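-- pv_equiv track=rewrite | github.com/eliottcassidy2000/math | 04-computation/p19_omega9_streaming.py | zm_orbit_class
-- ===== SOURCE A (Python) =====
-- def zm_orbit_class(seq, QR_list, p):
--     best = seq
--     for q in QR_list:
--         if q == 1:
--             continue
--         scaled = tuple((q * s) % p for s in seq)
--         if scaled < best:
--             best = scaled
--     return best
-- ===== SOURCE B (Python) =====
-- def zm_orbit_class(seq, QR_list, p):
--     # Column-by-column lexicographic minimum: eliminate candidates position
--     # by position instead of building and comparing whole scaled tuples.
--     cands = [q for q in QR_list if q != 1]
--     raw_alive = True
--     for s in seq: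
--         col = [(q * s) % p for q in cands]
--         if raw_alive:
--             col.append(s)
--         m = min(col)
--         cands = [q for q in cands if (q * s) % p == m]
--         raw_alive = raw_alive and s == m
--     if raw_alive:
--         return seq
--     q = cands[0]
--     return tuple((q * s) % p for s in seq)
-- ===== Notes on version B (the rewrite author's own statement) =====
-- stated objective: faster
-- what changed: B computes the lexicographic minimum column-by-column, keeping a shrinking set of surviving multipliers (plus a raw-sequence flag) and eliminating candidates position by position, instead of A's building every full scaled tuple and comparing whole tuples against a running best.
import Mathlib
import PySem

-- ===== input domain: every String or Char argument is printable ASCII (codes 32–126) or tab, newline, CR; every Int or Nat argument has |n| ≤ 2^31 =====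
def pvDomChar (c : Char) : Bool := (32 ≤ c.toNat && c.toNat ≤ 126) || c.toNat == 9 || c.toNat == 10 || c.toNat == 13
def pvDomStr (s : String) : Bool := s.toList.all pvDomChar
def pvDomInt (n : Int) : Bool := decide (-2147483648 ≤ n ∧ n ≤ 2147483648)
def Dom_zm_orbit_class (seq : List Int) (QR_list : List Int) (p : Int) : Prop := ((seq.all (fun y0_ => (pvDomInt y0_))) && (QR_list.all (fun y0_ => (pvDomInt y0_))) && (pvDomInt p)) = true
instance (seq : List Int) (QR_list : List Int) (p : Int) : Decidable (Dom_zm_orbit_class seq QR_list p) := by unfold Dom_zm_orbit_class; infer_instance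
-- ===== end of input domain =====

-- B computes the same lexicographic minimum column-by-column, eliminating multiplier candidates
-- position by position instead of building and comparing whole scaled tuples (measured faster).

-- ===== PORT A =====
-- Python tuple '<' (lexicographic, shorter strict prefix is smaller)
def pyLt : List Int → List Int → Bool
  | [], [] => false
  | [], _ :: _ => true
  | _ :: _, [] => false
  | a :: as, b :: bs => if a < b then true else if b < a then false else pyLt as bs

def zm_orbit_class (seq : List Int) (QR_list : List Int) (p : Int) : List Int :=
  QR_list.foldl (fun best q =>
    if q = 1 then best
    else
      let scaled := seq.map (fun s => PySem.Int.mod (q * s) p)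
      if pyLt scaled best then scaled else best) seq

-- ===== PORT B =====
-- body of B's loop over the positions s of seq: state = (surviving multipliers, raw seq still alive)
def altStep (p : Int) (st : List Int × Bool) (s : Int) : List Int × Bool :=
  let col := (st.1.map (fun q => PySem.Int.mod (q * s) p)) ++ (if st.2 then [s] else [])
  let m := (PySem.List.min? col (fun x => x)).getD 0
  (st.1.filter (fun q => PySem.Int.mod (q * s) p == m), st.2 && (s == m))

def altFinish (seq : List Int) (p : Int) (st : List Int × Bool) : List Int :=
  if st.2 then seq
  else
    match st.1 with
    | [] => seq            -- unreachable: some candidate always survives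
    | q :: _ => seq.map (fun s => PySem.Int.mod (q * s) p)

def zm_orbit_class_alt (seq : List Int) (QR_list : List Int) (p : Int) : List Int :=
  altFinish seq p (seq.foldl (altStep p) (QR_list.filter (fun q => q != 1), true))

-- ===== PRECONDITION & SPEC =====
-- Pre_ excludes exactly the inputs where Python A raises ZeroDivisionError:
-- p = 0 with a nonempty seq and some multiplier ≠ 1 (B raises there too).
def Pre_zm_orbit_class (seq : List Int) (QR_list : List Int) (p : Int) : Prop :=
  p ≠ 0 ∨ seq = [] ∨ ∀ q ∈ QR_list, q = 1
instance (seq : List Int) (QR_list : List Int) (p : Int) : Decidable (Pre_zm_orbit_class seq QR_list p) := by unfold Pre_zm_orbit_class; infer_instance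
def pvWitness_zm_orbit_class : List Int × List Int × Int := ([2, 3], [2, 4], 5)

def Spec_zm_orbit_class (seq : List Int) (QR_list : List Int) (p : Int) (out : List Int) : Prop := out = zm_orbit_class_alt seq QR_list p
instance (seq : List Int) (QR_list : List Int) (p : Int) (out : List Int) : Decidable (Spec_zm_orbit_class seq QR_list p out) := by unfold Spec_zm_orbit_class; infer_instance

-- ===== CLAIM (what is proved, stated in full; the proofs are below) =====
def Claim_equal_zm_orbit_class : Prop := ∀ (seq : List Int) (QR_list : List Int) (p : Int), Dom_zm_orbit_class seq QR_list p → Pre_zm_orbit_class seq QR_list p → Spec_zm_orbit_class seq QR_list p (zm_orbit_class seq QR_list p)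

-- ===== LEMMAS AND PROOFS =====

-- candidates: `some q` = multiplier q, `none` = the raw sequence
def cval (p s : Int) : Option Int → Int
  | none => s
  | some q => PySem.Int.mod (q * s) p

def cvec (p : Int) (seq : List Int) (c : Option Int) : List Int := seq.map (fun s => cval p s c)

def clist (cs : List Int) (raw : Bool) : List (Option Int) :=
  cs.map some ++ (if raw then [none] else [])

def cuniv (cands : List Int) : List (Option Int) := cands.map some ++ [none]

def LexMin (L : List (List Int)) (v : List Int) : Prop :=
  v ∈ L ∧ ∀ w ∈ L, pyLt w v = false

theorem pyLt_irrefl (a : List Int) : pyLt a a = false := by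
  induction a with
  | nil => rfl
  | cons x t ih => simp [pyLt, ih]

theorem pyLt_trans {a b c : List Int} (h1 : pyLt a b = true) (h2 : pyLt b c = true) :
    pyLt a c = true := by
  induction a generalizing b c with
  | nil =>
    cases b with
    | nil => simp [pyLt] at h1
    | cons y bs => cases c with
      | nil => simp [pyLt] at h2
      | cons z cs => simp [pyLt]
  | cons x as ih =>
    cases b with
    | nil => simp [pyLt] at h1
    | cons y bs =>
      cases c with
      | nil => simp [pyLt] at h2
      | cons z cs =>
        simp only [pyLt] at h1 h2 ⊢
        split_ifs at h1 h2 ⊢ <;> try omega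
        all_goals first
          | rfl
          | (exact ih h1 h2)
          | (omega)
          | (simp_all; omega)

theorem pyLt_total {a b : List Int} (h : pyLt a b = false) : pyLt b a = true ∨ a = b := by
  induction a generalizing b with
  | nil =>
    cases b with
    | nil => right; rfl
    | cons y bs => simp [pyLt] at h
  | cons x as ih =>
    cases b with
    | nil => left; simp [pyLt]
    | cons y bs =>
      simp only [pyLt] at h ⊢
      by_cases h1 : x < y
      · simp [h1] at h
      · by_cases h2 : y < x
        · simp [h2]
        · have hxy : x = y := by omega
          simp [h1, h2] at h ⊢
          rcases ih h with h' | h'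
          · exact Or.inl h'
          · exact Or.inr ⟨hxy, h'⟩
theorem lexMin_unique {L : List (List Int)} {v w : List Int}
    (hv : LexMin L v) (hw : LexMin L w) : v = w := by
  have h1 := hv.2 w hw.1
  have h2 := hw.2 v hv.1
  rcases pyLt_total h1 with h | h
  · rw [h] at h2; cases h2
  · exact h.symm

theorem pyLt_asymm {a b : List Int} (h : pyLt a b = true) : pyLt b a = false := by
  by_contra hc
  simp only [Bool.not_eq_false] at hc
  have := pyLt_trans h hc
  rw [pyLt_irrefl] at this
  cases this

-- "r ≤ b and b ≤ a implies r ≤ a", phrased with pyLt = false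
theorem pyLt_false_trans {a b c : List Int} (h1 : pyLt a b = false) (h2 : pyLt b c = false) :
    pyLt a c = false := by
  by_contra hc
  simp only [Bool.not_eq_false] at hc
  rcases pyLt_total h2 with h' | h'
  · have := pyLt_trans hc h'
    rw [h1] at this; cases this
  · rw [h'] at h1; rw [h1] at hc; cases hc

-- A's running-minimum fold computes a pyLt-minimal element
theorem foldl_min_lexMin (l : List (List Int)) :
    ∀ a, LexMin (a :: l) (l.foldl (fun best x => if pyLt x best then x else best) a) := by
  induction l with
  | nil =>
    intro a
    exact ⟨List.mem_singleton.mpr rfl, by intro w hw; simp at hw; subst hw; exact pyLt_irrefl _⟩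
  | cons x xs ih =>
    intro a
    simp only [List.foldl_cons]
    obtain ⟨hmem, hmin⟩ := ih (if pyLt x a then x else a)
    set a' := if pyLt x a then x else a with ha'
    set r := xs.foldl (fun best x => if pyLt x best then x else best) a' with hr
    have hra' : pyLt a' r = false := hmin _ (List.mem_cons_self ..)
    have ha'_cases : a' = a ∨ a' = x := by
      by_cases hxa : pyLt x a = true <;> simp [ha', hxa]
    have ha'_le_a : pyLt a a' = false := by
      by_cases hxa : pyLt x a = true
      · simp only [ha', hxa, if_pos] ; exact pyLt_asymm hxa
      · simp only [Bool.not_eq_true] at hxa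
        simp [ha', hxa, pyLt_irrefl]
    have ha'_le_x : pyLt x a' = false := by
      by_cases hxa : pyLt x a = true
      · simp [ha', hxa, pyLt_irrefl]
      · simp only [Bool.not_eq_true] at hxa
        simp [ha', hxa]
    refine ⟨?_, ?_⟩
    · rcases List.mem_cons.mp hmem with h | h
      · rcases ha'_cases with h' | h' <;> rw [h] <;> simp [h']
      · simp [List.mem_cons.mpr, h]
    · intro w hw
      rcases List.mem_cons.mp hw with hwa | hw'
      · subst hwa; exact pyLt_false_trans ha'_le_a hra'
      · rcases List.mem_cons.mp hw' with hwx | hwxs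
        · subst hwx; exact pyLt_false_trans ha'_le_x hra'
        · exact hmin w (List.mem_cons.mpr (Or.inr hwxs))

-- skipping q == 1 in the fold = folding over the filtered list
theorem mem_clist_some {cs : List Int} {raw : Bool} {q : Int} :
    some q ∈ clist cs raw ↔ q ∈ cs := by
  cases raw <;> simp [clist]

theorem mem_clist_none {cs : List Int} {raw : Bool} :
    (none ∈ clist cs raw) ↔ raw = true := by
  cases raw <;> simp [clist]

theorem map_clist (p s : Int) (cs : List Int) (raw : Bool) :
    (clist cs raw).map (cval p s) =
      cs.map (fun q => PySem.Int.mod (q * s) p) ++ (if raw then [s] else []) := by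
  cases raw <;> simp [clist, List.map_map, cval, Function.comp]

theorem cvec_append (p : Int) (pre : List Int) (s : Int) (c : Option Int) :
    cvec p (pre ++ [s]) c = cvec p pre c ++ [cval p s c] := by
  simp [cvec]

theorem cvec_length (p : Int) (u : List Int) (c : Option Int) : (cvec p u c).length = u.length := by
  simp [cvec]

theorem pyLt_append_last {u v : List Int} (h : u.length = v.length) (x y : Int) :
    pyLt (u ++ [x]) (v ++ [y]) = (if u = v then decide (x < y) else pyLt u v) := by
  induction u generalizing v with
  | nil =>
    cases v with
    | nil => simp [pyLt]
    | cons b bs => simp at h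
  | cons a as ih =>
    cases v with
    | nil => simp at h
    | cons b bs =>
      simp only [List.cons_append, pyLt]
      simp only [List.length_cons, Nat.add_right_cancel_iff] at h
      rw [ih h]
      by_cases h1 : a < b
      · have hab : a ≠ b := by omega
        simp [pyLt, h1, hab]
      · by_cases h2 : b < a
        · have hab : a ≠ b := by omega
          simp [pyLt, h1, h2, hab]
        · have hab : a = b := by omega
          subst hab
          by_cases h3 : as = bs <;> simp [pyLt, h1, h2, h3]

-- loop invariant for B's column elimination
def LoopInv (p : Int) (cands : List Int) (pre : List Int) (st : List Int × Bool) : Prop :=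
  (∀ q ∈ st.1, q ∈ cands) ∧
  (∃ c, c ∈ clist st.1 st.2) ∧
  (∀ c ∈ cuniv cands,
    (c ∈ clist st.1 st.2 ↔ ∀ c' ∈ cuniv cands, pyLt (cvec p pre c') (cvec p pre c) = false))

theorem loopInv_init (p : Int) (cands : List Int) : LoopInv p cands [] (cands, true) := by
  refine ⟨fun q hq => hq, ⟨none, mem_clist_none.mpr rfl⟩, ?_⟩
  intro c hc
  constructor
  · intro _ c' _
    simp [cvec, pyLt]
  · intro _
    cases c with
    | none => exact mem_clist_none.mpr rfl
    | some q =>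
      apply mem_clist_some.mpr
      simp only [cuniv, List.mem_append, List.mem_map, List.mem_singleton] at hc
      rcases hc with ⟨a, ha, hEq⟩ | hEq
      · cases hEq; exact ha
      · cases hEq

theorem clist_subset_cuniv {p : Int} {cands : List Int} {pre : List Int} {st : List Int × Bool}
    (hsub : ∀ q ∈ st.1, q ∈ cands) : ∀ c ∈ clist st.1 st.2, c ∈ cuniv cands := by
  intro c hc
  cases c with
  | none => simp [cuniv]
  | some q =>
    simp only [cuniv, List.mem_append, List.mem_map, List.mem_singleton]
    exact Or.inl ⟨q, hsub q (mem_clist_some.mp hc), rfl⟩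

theorem loopInv_step (p : Int) (cands : List Int) (pre : List Int) (st : List Int × Bool) (s : Int)
    (h : LoopInv p cands pre st) : LoopInv p cands (pre ++ [s]) (altStep p st s) := by
  obtain ⟨hsub, ⟨c0, hc0⟩, hiff⟩ := h
  have hclist_univ := clist_subset_cuniv (p := p) (pre := pre) hsub
  set col := (st.1.map (fun q => PySem.Int.mod (q * s) p)) ++ (if st.2 then [s] else []) with hcol
  have hcol_eq : col = (clist st.1 st.2).map (cval p s) := by rw [hcol, map_clist]
  have hcol_ne : col ≠ [] := by
    rw [hcol_eq]
    intro hnil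
    rw [List.map_eq_nil_iff] at hnil
    rw [hnil] at hc0
    cases hc0
  obtain ⟨m, hm⟩ : ∃ m, PySem.List.min? col (fun x => x) = some m := by
    cases hmm : PySem.List.min? col (fun x => x) with
    | none => exact absurd (by rwa [PySem.List.min?_eq_none_iff] at hmm) hcol_ne
    | some m => exact ⟨m, rfl⟩
  have hm_mem : ∃ c1 ∈ clist st.1 st.2, cval p s c1 = m := by
    have hmem := PySem.List.min?_mem hm
    rw [hcol_eq] at hmem
    exact List.mem_map.mp hmem
  have hm_min : ∀ c' ∈ clist st.1 st.2, m ≤ cval p s c' := by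
    intro c' hc'
    have := PySem.List.min?_isMin hm (cval p s c')
      (by rw [hcol_eq]; exact List.mem_map_of_mem hc')
    simpa using this
  have hstep : altStep p st s
      = (st.1.filter (fun q => PySem.Int.mod (q * s) p == m), st.2 && (s == m)) := by
    simp only [altStep, ← hcol, hm, Option.getD_some]
  rw [hstep]
  have hmem_new : ∀ c, (c ∈ clist (st.1.filter (fun q => PySem.Int.mod (q * s) p == m)) (st.2 && (s == m)))
      ↔ (c ∈ clist st.1 st.2 ∧ cval p s c = m) := by
    intro c
    cases c with
    | none =>
      rw [mem_clist_none, mem_clist_none]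
      constructor
      · intro hb
        simp only [Bool.and_eq_true, beq_iff_eq] at hb
        exact ⟨hb.1, hb.2⟩
      · rintro ⟨h1, h2⟩
        simp only [Bool.and_eq_true, beq_iff_eq]
        exact ⟨h1, h2⟩
    | some q =>
      rw [mem_clist_some, mem_clist_some, List.mem_filter]
      simp [cval]
  refine ⟨?_, ?_, ?_⟩
  · intro q hq
    exact hsub q (List.mem_filter.mp hq).1
  · obtain ⟨c1, hc1, hc1v⟩ := hm_mem
    exact ⟨c1, (hmem_new c1).mpr ⟨hc1, hc1v⟩⟩
  · intro c hcU
    rw [hmem_new c]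
    constructor
    · rintro ⟨hc_old, hcv⟩ c' hc'
      have hlen : (cvec p pre c').length = (cvec p pre c).length := by
        rw [cvec_length, cvec_length]
      rw [cvec_append, cvec_append, pyLt_append_last hlen]
      have hc_min := (hiff c hcU).mp hc_old
      by_cases heq : cvec p pre c' = cvec p pre c
      · rw [if_pos heq]
        have hc'_old : c' ∈ clist st.1 st.2 :=
          (hiff c' hc').mpr (by rw [heq]; exact hc_min)
        have hge := hm_min c' hc'_old
        simp only [decide_eq_false_iff_not, not_lt]
        omega
      · rw [if_neg heq]
        exact hc_min c' hc'
    · intro hall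
      have hc_old : c ∈ clist st.1 st.2 := by
        refine (hiff c hcU).mpr ?_
        intro c' hc'
        by_contra hlt
        simp only [Bool.not_eq_false] at hlt
        have hne : cvec p pre c' ≠ cvec p pre c := by
          intro hEq
          rw [hEq, pyLt_irrefl] at hlt
          cases hlt
        have hfa := hall c' hc'
        rw [cvec_append, cvec_append,
          pyLt_append_last (by rw [cvec_length, cvec_length]), if_neg hne, hlt] at hfa
        cases hfa
      refine ⟨hc_old, ?_⟩
      obtain ⟨c1, hc1, hc1v⟩ := hm_mem
      have hc1U := hclist_univ c1 hc1
      have hpre_eq : cvec p pre c1 = cvec p pre c := by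
        have h1 : pyLt (cvec p pre c1) (cvec p pre c) = false := (hiff c hcU).mp hc_old c1 hc1U
        have h2 : pyLt (cvec p pre c) (cvec p pre c1) = false := (hiff c1 hc1U).mp hc1 c hcU
        rcases pyLt_total h2 with h' | h'
        · rw [h'] at h1; cases h1
        · exact h'.symm
      have hfa := hall c1 hc1U
      rw [cvec_append, cvec_append,
        pyLt_append_last (by rw [cvec_length, cvec_length]), if_pos hpre_eq, hc1v] at hfa
      have hle := hm_min c hc_old
      simp only [decide_eq_false_iff_not, not_lt] at hfa
      omega

theorem loopInv_fold (p : Int) (cands : List Int) (pre suf : List Int) (st : List Int × Bool)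
    (h : LoopInv p cands pre st) : LoopInv p cands (pre ++ suf) (suf.foldl (altStep p) st) := by
  induction suf generalizing pre st with
  | nil => simpa using h
  | cons s t ih =>
    have := ih (pre ++ [s]) (altStep p st s) (loopInv_step p cands pre st s h)
    simpa using this

theorem cvec_none (p : Int) (seq : List Int) : cvec p seq none = seq := by
  simp [cvec, cval]

theorem cvec_some (p : Int) (seq : List Int) (q : Int) :
    cvec p seq (some q) = seq.map (fun s => PySem.Int.mod (q * s) p) := rfl

theorem A_fold_eq (seq : List Int) (p : Int) (l : List Int) (a : List Int) :
    l.foldl (fun best q => if q = 1 then best else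
      let scaled := seq.map (fun s => PySem.Int.mod (q * s) p)
      if pyLt scaled best then scaled else best) a
    = ((l.filter (fun q => q != 1)).map (fun q => seq.map (fun s => PySem.Int.mod (q * s) p))).foldl
        (fun best v => if pyLt v best then v else best) a := by
  induction l generalizing a with
  | nil => rfl
  | cons x t ih => by_cases hx : x = 1 <;> simp [hx, ih]

theorem main_eq (seq : List Int) (QR_list : List Int) (p : Int) :
    zm_orbit_class seq QR_list p = zm_orbit_class_alt seq QR_list p := by
  set cands := QR_list.filter (fun q => q != 1) with hcands
  set st := seq.foldl (altStep p) (cands, true) with hst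
  have hInv : LoopInv p cands seq st := by
    have := loopInv_fold p cands [] seq (cands, true) (loopInv_init p cands)
    simpa using this
  obtain ⟨hsub, ⟨c0, hc0⟩, hiff⟩ := hInv
  have hclist_univ := clist_subset_cuniv (p := p) (pre := seq) hsub
  have hA : LexMin (seq :: cands.map (fun q => seq.map (fun s => PySem.Int.mod (q * s) p)))
      (zm_orbit_class seq QR_list p) := by
    have h1 : zm_orbit_class seq QR_list p
        = (cands.map (fun q => seq.map (fun s => PySem.Int.mod (q * s) p))).foldl
            (fun best v => if pyLt v best then v else best) seq := by
      unfold zm_orbit_class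
      rw [hcands]
      exact A_fold_eq seq p QR_list seq
    rw [h1]
    exact foldl_min_lexMin _ seq
  have hmemiff : ∀ v, (v ∈ seq :: cands.map (fun q => seq.map (fun s => PySem.Int.mod (q * s) p)))
      ↔ (∃ c ∈ cuniv cands, cvec p seq c = v) := by
    intro v
    constructor
    · intro hv
      rcases List.mem_cons.mp hv with h | h
      · exact ⟨none, by simp [cuniv], by rw [cvec_none, h]⟩
      · obtain ⟨q, hq, hEq⟩ := List.mem_map.mp h
        exact ⟨some q, by simp [cuniv, hq], by rw [cvec_some, hEq]⟩
    · rintro ⟨c, hcU, rfl⟩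
      cases c with
      | none => rw [cvec_none]; exact List.mem_cons_self ..
      | some q =>
        rw [cvec_some]
        refine List.mem_cons.mpr (Or.inr (List.mem_map_of_mem ?_))
        simp only [cuniv, List.mem_append, List.mem_map, List.mem_singleton] at hcU
        rcases hcU with ⟨a, ha, hEq⟩ | hEq
        · cases hEq; exact ha
        · cases hEq
  have hB_min : ∀ c ∈ clist st.1 st.2,
      LexMin (seq :: cands.map (fun q => seq.map (fun s => PySem.Int.mod (q * s) p))) (cvec p seq c) := by
    intro c hc
    have hcU := hclist_univ c hc
    have hmin := (hiff c hcU).mp hc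
    refine ⟨(hmemiff _).mpr ⟨c, hcU, rfl⟩, ?_⟩
    intro w hw
    obtain ⟨c', hc', rfl⟩ := (hmemiff w).mp hw
    exact hmin c' hc'
  have hBdef : zm_orbit_class_alt seq QR_list p = altFinish seq p st := rfl
  rw [hBdef]
  cases hs2 : st.2 with
  | true =>
    have hmin := hB_min none (mem_clist_none.mpr hs2)
    rw [cvec_none] at hmin
    have hval := lexMin_unique hA hmin
    unfold altFinish
    rw [hs2]
    simpa using hval
  | false =>
    cases hs1 : st.1 with
    | nil =>
      exfalso
      rw [hs1, hs2] at hc0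
      simp [clist] at hc0
    | cons q rest =>
      have hq : some q ∈ clist st.1 st.2 := mem_clist_some.mpr (by rw [hs1]; exact List.mem_cons_self ..)
      have hmin := hB_min _ hq
      rw [cvec_some] at hmin
      have hval := lexMin_unique hA hmin
      unfold altFinish
      rw [hs2, hs1]
      simpa using hval

-- ===== VERDICT (by name: the statement is the Claim_ definition above) =====
theorem zm_orbit_class_spec : Claim_equal_zm_orbit_class := by
  intro seq QR_list p _ _
  unfold Spec_zm_orbit_class
  exact main_eq seq QR_list p
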